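-- pv_equiv track=rewrite | github.com/Ryles1/AdventofCode | 2025/day2.py | is_invalid_id2
-- ===== SOURCE A (Python) =====
-- def is_invalid_id2(id_num: str, divisor):
--     segments = []
--     id_length = len(id_num)
--     seg_length = divisor
--     for i in range(0, id_length, seg_length):
--         segments.append(id_num[i:i+seg_length])
--     if all(s == segments[0] for s in segments):
--         return True
--     return False
-- ===== SOURCE B (Python) =====
-- def is_invalid_id2(id_num: str, divisor):
--     # The id is "invalid" when it is just its first block repeated:
--     # compare against that block times the (ceiling) number of blocks.
--     blocks = -(-len(id_num) // divisor)
--     return id_num == id_num[:divisor] * blocks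
-- ===== Notes on version B (the rewrite author's own statement) =====
-- stated objective: simpler
-- what changed: B replaces A's segment-collection loop plus all()-scan by a single closed-form comparison: the string equals its first block repeated ceil(len/divisor) times.
-- intended difference: For divisor < 0 with a nonempty id_num, A's range(0, n, divisor) is empty so A returns a vacuous True; B returns False because no nonempty string is a repetition of a block of negative length, which is the intended answer for a repetition check. — e.g. on is_invalid_id2("ab", -1): A returns true, B returns false
import Mathlib
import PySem

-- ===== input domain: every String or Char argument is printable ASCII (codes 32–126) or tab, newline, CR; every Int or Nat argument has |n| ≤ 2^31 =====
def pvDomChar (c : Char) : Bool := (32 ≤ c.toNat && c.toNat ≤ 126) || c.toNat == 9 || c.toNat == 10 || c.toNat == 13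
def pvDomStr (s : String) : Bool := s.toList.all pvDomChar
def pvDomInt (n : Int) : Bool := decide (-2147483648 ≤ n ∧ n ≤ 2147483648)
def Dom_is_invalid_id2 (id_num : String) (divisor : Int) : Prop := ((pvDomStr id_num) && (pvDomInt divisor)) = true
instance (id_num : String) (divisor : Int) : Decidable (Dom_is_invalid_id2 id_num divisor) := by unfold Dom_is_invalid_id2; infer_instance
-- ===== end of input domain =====

-- B replaces A's segment loop + all() scan by one closed-form comparison: the string
-- equals its first block repeated ceil(len/divisor) times (objective: simpler).

-- ===== PORT A =====
def is_invalid_id2 (id_num : String) (divisor : Int) : Bool :=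
  let segments : List String := []
  let id_length : Int := PySem.Str.len id_num
  let seg_length : Int := divisor
  let segments := (PySem.List.pyRange 0 id_length seg_length).foldl
    (fun segs i => segs ++ [PySem.Str.slice id_num (some i) (some (i + seg_length))]) segments
  match segments with
  | [] => true                       -- all() over an empty generator: segments[0] never evaluated
  | s0 :: rest => if (s0 :: rest).all (fun s => s == s0) then true else false

-- ===== PORT B =====
-- Python's 'first * blocks' (string repetition, '' for blocks ≤ 0) is ported as
-- List.flatten (List.replicate blocks.toNat first.toList).
def is_invalid_id2_alt (id_num : String) (divisor : Int) : Bool :=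
  let blocks : Int := -(PySem.Int.floordiv (-(PySem.Str.len id_num)) divisor)
  id_num == String.ofList
    (List.flatten (List.replicate blocks.toNat
      (PySem.Str.slice id_num none (some divisor)).toList))

-- ===== PRECONDITION & SPEC =====
-- Pre_ excludes exactly divisor = 0, where both programs raise (A: ValueError from
-- range() step 0; B: ZeroDivisionError).
def Pre_is_invalid_id2 (id_num : String) (divisor : Int) : Prop := divisor ≠ 0
instance (id_num : String) (divisor : Int) : Decidable (Pre_is_invalid_id2 id_num divisor) := by unfold Pre_is_invalid_id2; infer_instance
def pvWitness_is_invalid_id2 : String × Int := ("abab", 2)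
-- For divisor < 0 with a nonempty id_num, A's range(0, n, divisor) is empty so A returns
-- a vacuous True; B returns False because no nonempty string is a repetition of a block
-- of negative length, which is the intended answer for a repetition check.
def D_is_invalid_id2 (id_num : String) (divisor : Int) : Prop := divisor < 0 ∧ id_num ≠ ""
instance (id_num : String) (divisor : Int) : Decidable (D_is_invalid_id2 id_num divisor) := by unfold D_is_invalid_id2; infer_instance
def Spec_is_invalid_id2 (id_num : String) (divisor : Int) (out : Bool) : Prop := ¬ D_is_invalid_id2 id_num divisor → out = is_invalid_id2_alt id_num divisor
instance (id_num : String) (divisor : Int) (out : Bool) : Decidable (Spec_is_invalid_id2 id_num divisor out) := by unfold Spec_is_invalid_id2; infer_instance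
def pvDiffWitness_is_invalid_id2 : String × Int := ("ab", -1)
def pvDiffWitnessOut_is_invalid_id2 : Bool × Bool := (true, false)

-- ===== CLAIM (what is proved, stated in full; the proofs are below) =====
def Claim_unchanged_is_invalid_id2 : Prop := ∀ (id_num : String) (divisor : Int), Dom_is_invalid_id2 id_num divisor → Pre_is_invalid_id2 id_num divisor → Spec_is_invalid_id2 id_num divisor (is_invalid_id2 id_num divisor)
def Claim_changed_is_invalid_id2 : Prop := Dom_is_invalid_id2 (pvDiffWitness_is_invalid_id2.1) (pvDiffWitness_is_invalid_id2.2) ∧ Pre_is_invalid_id2 (pvDiffWitness_is_invalid_id2.1) (pvDiffWitness_is_invalid_id2.2) ∧ D_is_invalid_id2 (pvDiffWitness_is_invalid_id2.1) (pvDiffWitness_is_invalid_id2.2) ∧ is_invalid_id2 (pvDiffWitness_is_invalid_id2.1) (pvDiffWitness_is_invalid_id2.2) = pvDiffWitnessOut_is_invalid_id2.1 ∧ is_invalid_id2_alt (pvDiffWitness_is_invalid_id2.1) (pvDiffWitness_is_invalid_id2.2) = pvDiffWitnessOut_is_invalid_id2.2 ∧ pvDiffWitnessOut_is_invalid_id2.1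 ≠ pvDiffWitnessOut_is_invalid_id2.2
def Claim_exact_is_invalid_id2 : Prop := ∀ (id_num : String) (divisor : Int), Dom_is_invalid_id2 id_num divisor → Pre_is_invalid_id2 id_num divisor → D_is_invalid_id2 id_num divisor → is_invalid_id2 id_num divisor ≠ is_invalid_id2_alt id_num divisor

-- ===== LEMMAS AND PROOFS =====

-- Chunks of a list in blocks of d (last may be shorter); total for every d.
def chunksC (d : Nat) : List Char → List (List Char)
  | [] => []
  | c :: cs => (c :: cs).take d :: chunksC d (cs.drop (d - 1))
termination_by l => l.length
decreasing_by simp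

-- A's final test, on the list-of-chunks level
def allEqHead : List (List Char) → Bool
  | [] => true
  | s0 :: rest => if (s0 :: rest).all (fun s => s == s0) then true else false

theorem chunksC_nil (d : Nat) : chunksC d [] = [] := by rw [chunksC.eq_def]

theorem chunksC_eq_cons (d : Nat) (hd : 0 < d) (l : List Char) (hl : l ≠ []) :
    chunksC d l = l.take d :: chunksC d (l.drop d) := by
  cases l with
  | nil => exact absurd rfl hl
  | cons c cs =>
    have h : cs.drop (d - 1) = (c :: cs).drop d := by
      conv_rhs => rw [show d = (d - 1) + 1 by omega]
      rw [List.drop_succ_cons]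
    rw [chunksC.eq_def]
    show (c :: cs).take d :: chunksC d (cs.drop (d - 1)) = _
    rw [h]

theorem foldl_push {α β : Type} (f : α → β) (xs : List α) (init : List β) :
    xs.foldl (fun acc x => acc ++ [f x]) init = init ++ xs.map f := by
  induction xs generalizing init with
  | nil => simp
  | cons x xs ih => simp [List.foldl_cons, ih]

theorem pyRange_pos_cons (a b s : Int) (hs : 0 < s) (hab : a < b) :
    PySem.List.pyRange a b s = a :: PySem.List.pyRange (a + s) b s := by
  rw [PySem.List.pyRange_of_pos _ _ hs, PySem.List.pyRange_of_pos _ _ hs]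
  have hcount : ((b - a + s - 1) / s).toNat
      = (if a + s < b then ((b - (a + s) + s - 1) / s).toNat else 0) + 1 := by
    have h1 : b - a + s - 1 = (b - a - 1) + 1 * s := by ring
    have h2 : (b - a + s - 1) / s = (b - a - 1) / s + 1 := by
      rw [h1, Int.add_mul_ediv_right _ _ (by omega)]
    split_ifs with h
    · have h3 : b - (a + s) + s - 1 = b - a - 1 := by ring
      rw [h2, h3]
      have hnn : 0 ≤ (b - a - 1) / s := Int.ediv_nonneg (by omega) (by omega)
      omega
    · have h0 : (b - a - 1) / s = 0 := Int.ediv_eq_zero_of_lt (by omega) (by omega)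
      rw [h2, h0]
      rfl
  rw [if_pos hab, hcount, List.range_succ_eq_map]
  simp only [List.map_cons, List.map_map, Nat.cast_zero, mul_zero, add_zero]
  congr 1
  apply List.map_congr_left
  intro k _
  simp only [Function.comp, Nat.succ_eq_add_one]
  push_cast
  ring

theorem segs (d : Nat) (hd : 0 < d) (L : List Char) (a : Nat) :
    ((PySem.List.pyRange (a : Int) (L.length : Int) (d : Int)).map
      (fun i => PySem.List.slice L (some i) (some (i + (d : Int))))) = chunksC d (L.drop a) := by
  by_cases h : a < L.length
  · rw [pyRange_pos_cons _ _ _ (by exact_mod_cast hd) (by exact_mod_cast h)]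
    have hcast : ((a : Int) + (d : Int)) = ((a + d : Nat) : Int) := by push_cast; ring
    rw [List.map_cons, hcast]
    rw [segs d hd L (a + d)]
    have hslice : PySem.List.slice L (some (a : Int)) (some ((a + d : Nat) : Int))
        = (L.drop a).take d := by
      have := PySem.List.slice_natCast (xs := L) (a := a) (b := a + d)
      simpa using this
    rw [hslice, chunksC_eq_cons d hd (L.drop a) (by
      intro hnil
      have := List.drop_eq_nil_iff.mp hnil
      omega), List.drop_drop]
  · have h1 : PySem.List.pyRange (a : Int) (L.length : Int) (d : Int) = [] := by
      rw [PySem.List.pyRange_of_pos _ _ (by exact_mod_cast hd)]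
      rw [if_neg (by exact_mod_cast h)]
      simp
    have h2 : L.drop a = [] := List.drop_eq_nil_iff.mpr (by omega)
    rw [h1, h2, chunksC_nil]
    simp
termination_by L.length - a

theorem chunksC_flatten (d : Nat) (hd : 0 < d) (l : List Char) :
    (chunksC d l).flatten = l := by
  cases hl : l with
  | nil => simp [chunksC_nil]
  | cons c cs =>
    rw [← hl, chunksC_eq_cons d hd l (by simp [hl])]
    rw [List.flatten_cons, chunksC_flatten d hd (l.drop d)]
    exact List.take_append_drop d l
termination_by l.length
decreasing_by simp [hl]; omega

theorem chunksC_replicate (d : Nat) (hd : 0 < d) (f : List Char) (hf : f.length = d) :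
    ∀ (c : Nat), chunksC d (List.flatten (List.replicate c f)) = List.replicate c f := by
  intro c
  induction c with
  | zero => simp [chunksC_nil]
  | succ c ih =>
    rw [List.replicate_succ, List.flatten_cons]
    have hfne : f ≠ [] := by intro h; rw [h] at hf; simp at hf; omega
    rw [chunksC_eq_cons d hd _ (by simp [hfne])]
    rw [← hf, List.take_left, List.drop_left, hf, ih]

theorem len_flatten_replicate (c : Nat) (f : List Char) :
    (List.flatten (List.replicate c f)).length = c * f.length := by
  induction c with
  | zero => simp
  | succ c ih => rw [List.replicate_succ, List.flatten_cons]; simp [ih]; ring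

theorem count_eq (n d q : Nat) (hd : 0 < d) (h1 : (q - 1 : Int) * d < n) (h2 : (n : Int) ≤ q * d) :
    (-(PySem.Int.floordiv (-(n : Int)) (d : Int))).toNat = q := by
  have hq : -(PySem.Int.floordiv (-(n : Int)) (d : Int)) = (q : Int) := by
    rw [PySem.Int.neg_floordiv_neg_eq_iff_of_pos (by exact_mod_cast hd)]
    exact ⟨h1, h2⟩
  rw [hq]
  exact Int.toNat_natCast q

theorem ofList_beq (x y : List Char) : (String.ofList x == String.ofList y) = (x == y) := by
  by_cases h : x = y
  · simp [h]
  · have : String.ofList x ≠ String.ofList y := by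
      intro he
      exact h (by simpa using congrArg String.toList he)
    simp [h, this]

theorem allEqHead_cons (f : List Char) (cs : List (List Char)) :
    allEqHead (f :: cs) = (f :: cs).all (fun s => s == f) := by
  cases h : (f :: cs).all (fun s => s == f) <;> simp [allEqHead, h]

-- the core list-level equivalence, for a positive block size d
theorem core (d : Nat) (hd : 0 < d) (l : List Char) :
    allEqHead (chunksC d l)
    = (l == List.flatten (List.replicate
        (-(PySem.Int.floordiv (-((l.length : Nat) : Int)) (d : Int))).toNat (l.take d))) := by
  by_cases hn : l.length ≤ d
  · -- at most one chunk: both sides are true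
    by_cases h0 : l = []
    · subst h0
      have hc : (-(PySem.Int.floordiv (-((0 : Nat) : Int)) (d : Int))).toNat = 0 :=
        count_eq 0 d 0 hd (by push_cast; omega) (by push_cast; omega)
      simp only [List.length_nil] at hc ⊢
      rw [chunksC_nil, hc]
      simp [allEqHead]
    · have hlen : 0 < l.length := List.length_pos_iff.mpr h0
      have hc : (-(PySem.Int.floordiv (-((l.length : Nat) : Int)) (d : Int))).toNat = 1 :=
        count_eq l.length d 1 hd (by push_cast; omega) (by push_cast; omega)
      have htake : l.take d = l := List.take_of_length_le hn
      have hdrop : l.drop d = [] := List.drop_eq_nil_iff.mpr hn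
      rw [chunksC_eq_cons d hd l h0, hc, htake, hdrop, chunksC_nil, allEqHead_cons]
      simp
  · -- more than one chunk
    rw [not_le] at hn
    have h0 : l ≠ [] := by intro h; rw [h] at hn; simp at hn
    have hfl : (l.take d).length = d := by simp; omega
    rw [Bool.eq_iff_iff]
    constructor
    · -- A true → B true
      intro hA
      rw [chunksC_eq_cons d hd l h0, allEqHead_cons] at hA
      set ch := l.take d :: chunksC d (l.drop d) with hch
      have hall : ∀ s ∈ ch, s = l.take d := by
        intro s hs
        have := List.all_eq_true.mp hA s hs
        simpa using this
      have hrep : ch = List.replicate ch.length (l.take d) :=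
        List.eq_replicate_iff.mpr ⟨rfl, hall⟩
      have hflat : ch.flatten = l := by
        rw [hch, ← chunksC_eq_cons d hd l h0]
        exact chunksC_flatten d hd l
      have hlen : l.length = ch.length * d := by
        conv_lhs => rw [← hflat]
        rw [hrep, len_flatten_replicate, hfl, List.length_replicate]
      have hcpos : 0 < ch.length := by rw [hch]; simp
      have hc : (-(PySem.Int.floordiv (-((l.length : Nat) : Int)) (d : Int))).toNat = ch.length := by
        apply count_eq _ _ _ hd
        · have he : ((ch.length : Int) - 1) * d = (ch.length : Int) * d - d := by ring
          have hl2 : (l.length : Int) = (ch.length : Int) * d := by exact_mod_cast hlen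
          rw [he, hl2]
          omega
        · have hl2 : (l.length : Int) = (ch.length : Int) * d := by exact_mod_cast hlen
          rw [hl2]
      rw [hc, ← hrep, hflat]
      simp
    · -- B true → A true
      intro hB
      set c := (-(PySem.Int.floordiv (-((l.length : Nat) : Int)) (d : Int))).toNat with hc
      have hl : l = List.flatten (List.replicate c (l.take d)) := by simpa using hB
      have hchunks : chunksC d l = List.replicate c (l.take d) := by
        conv_lhs => rw [hl]
        exact chunksC_replicate d hd (l.take d) hfl c
      have hcpos : 0 < c := by
        by_contra hcz
        have hz : c = 0 := by omega
        rw [hz] at hl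
        simp at hl
        exact h0 hl
      rw [hchunks, show c = (c - 1) + 1 by omega, List.replicate_succ, allEqHead_cons]
      simp

theorem pyRange_neg_empty (n s : Int) (hn : 0 ≤ n) (hs : s < 0) :
    PySem.List.pyRange 0 n s = [] := by
  rw [PySem.List.pyRange]
  rw [if_neg (by omega)]
  rw [if_neg (by omega)]
  rw [if_neg (by omega)]
  simp

-- B's block count is ≤ 0 when the divisor is negative
theorem blocks_nonpos (n : Nat) (d : Int) (hd : d < 0) :
    (-(PySem.Int.floordiv (-(n : Int)) d)).toNat = 0 := by
  have h1 : PySem.Int.floordiv (-(n : Int)) d = PySem.Int.floordiv (n : Int) (-d) := by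
    conv_lhs => rw [show d = -(-d) by ring]
    exact PySem.Int.floordiv_neg_neg (n : Int) (-d)
  have h2 : 0 ≤ PySem.Int.floordiv (n : Int) (-d) := by
    rw [PySem.Int.floordiv_eq_ediv_of_pos (by omega)]
    exact Int.ediv_nonneg (by positivity) (by omega)
  rw [h1]
  omega

-- A on a negative divisor: the range is empty, so the result is true
theorem portA_neg (id_num : String) (divisor : Int) (hneg : divisor < 0) :
    is_invalid_id2 id_num divisor = true := by
  unfold is_invalid_id2
  simp only []
  rw [PySem.Str.len_eq, pyRange_neg_empty _ _ (by positivity) hneg]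
  rfl

-- B on a negative divisor: the repeated block is empty, so it tests id_num == ""
theorem portB_neg (id_num : String) (divisor : Int) (hneg : divisor < 0) :
    is_invalid_id2_alt id_num divisor = (id_num == "") := by
  unfold is_invalid_id2_alt
  simp only []
  rw [PySem.Str.len_eq, blocks_nonpos _ _ hneg]
  simp

-- ===== VERDICT (by name: the statements are the Claim_ definitions above) =====
theorem is_invalid_id2_spec : Claim_unchanged_is_invalid_id2 := by
  intro id_num divisor _ hpre
  unfold Spec_is_invalid_id2
  intro hnD
  rcases lt_trichotomy divisor 0 with hneg | hz | hpos
  · -- negative divisor: outside D_ the string is empty, both sides are true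
    have hempty : id_num = "" := by
      by_contra h
      exact hnD ⟨hneg, h⟩
    rw [portA_neg id_num divisor hneg, portB_neg id_num divisor hneg, hempty]
    rfl
  · exact absurd hz hpre
  · -- positive divisor
    unfold is_invalid_id2 is_invalid_id2_alt
    simp only []
    rw [PySem.Str.len_eq]
    set l := id_num.toList with hl
    set d := divisor.toNat with hdd
    have hdcast : divisor = (d : Int) := by omega
    have hd : 0 < d := by omega
    have hid : id_num = String.ofList l := by
      apply String.ext_iff.mpr; simp [hl]
    rw [hdcast]
    -- turn A's appended slices into chunks of l
    have hsliceS : ∀ i : Int, PySem.Str.slice id_num (some i) (some (i + (d : Int)))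
        = String.ofList (PySem.List.slice l (some i) (some (i + (d : Int)))) := by
      intro i
      apply String.ext_iff.mpr
      rw [PySem.Str.toList_slice]
      simp [PySem.Chars.slice_eq_listSlice, hl]
    rw [PySem.List.foldl_congr_mem _ _
      (fun segs i => segs ++ [String.ofList (PySem.List.slice l (some i) (some (i + (d : Int))))]) _
      (fun segs i _ => by rw [hsliceS i])]
    rw [foldl_push
      (fun i => String.ofList (PySem.List.slice l (some i) (some (i + (d : Int))))) _ []]
    rw [List.nil_append]
    have hsegs : ((PySem.List.pyRange 0 (l.length : Int) (d : Int)).map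
        (fun i => String.ofList (PySem.List.slice l (some i) (some (i + (d : Int))))))
        = (chunksC d l).map String.ofList := by
      have h1 : ((PySem.List.pyRange 0 (l.length : Int) (d : Int)).map
          (fun i => PySem.List.slice l (some i) (some (i + (d : Int))))) = chunksC d l := by
        have := segs d hd l 0
        simpa using this
      calc ((PySem.List.pyRange 0 (l.length : Int) (d : Int)).map
            (fun i => String.ofList (PySem.List.slice l (some i) (some (i + (d : Int))))))
          = (((PySem.List.pyRange 0 (l.length : Int) (d : Int)).map
              (fun i => PySem.List.slice l (some i) (some (i + (d : Int))))).map
                String.ofList) := by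
              rw [List.map_map]
              apply List.map_congr_left
              intro x _
              rfl
        _ = (chunksC d l).map String.ofList := by rw [h1]
    rw [hsegs]
    -- B side normalization
    have hBslice : (PySem.Str.slice id_num none (some ((d : Nat) : Int))).toList = l.take d := by
      rw [PySem.Str.toList_slice, PySem.Chars.slice_eq_listSlice]
      exact PySem.List.slice_to_natCast l d
    have hBeq : ∀ (z : List Char), (id_num == String.ofList z) = (l == z) := by
      intro z
      conv_lhs => rw [hid]
      exact ofList_beq l z
    rw [hBslice, hBeq, ← core d hd l]
    -- A's match over mapped chunks equals allEqHead of the chunks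
    cases chunksC d l with
    | nil => rfl
    | cons f cs =>
      rw [List.map_cons, allEqHead_cons]
      show (if ((String.ofList f :: cs.map String.ofList).all
              fun s => s == String.ofList f) = true then true else false) = _
      have hcond : ((String.ofList f :: cs.map String.ofList).all
          (fun s => s == String.ofList f)) = (f :: cs).all (fun s => s == f) := by
        rw [← List.map_cons, List.all_map]
        congr 1
        funext x
        exact ofList_beq x f
      rw [hcond]
      cases hb : (f :: cs).all (fun s => s == f) <;> simp [hb]

theorem is_invalid_id2_changed : Claim_changed_is_invalid_id2 := by
  unfold Claim_changed_is_invalid_id2; decide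

theorem is_invalid_id2_tight : Claim_exact_is_invalid_id2 := by
  intro id_num divisor _ _ hD
  obtain ⟨hneg, hne⟩ := hD
  rw [portA_neg id_num divisor hneg, portB_neg id_num divisor hneg]
  simp [hne]
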